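-- pv_equiv track=rewrite | github.com/taechanha/PS | 샘숭/상어중.py | gravitate
-- ===== SOURCE A (Python) =====
-- EMPTY = 9
--
-- def gravitate(board):
--     n, m = len(board), len(board[0])
--     for c in range(m):
--         row = []
--         for r in range(n-1, -1, -1):
--             row.append(board[r][c])
--         row = moveLeft(row)
--         for r, elem in zip(range(n-1, -1, -1), row):
--             board[r][c] = elem
--     return board
--
-- def moveLeft(row):
--     for i in range(len(row)):
--         if row[i] == -1:
--             continue
--         j = i
--         while j > 0 and row[j-1] == EMPTY:
--             row[j-1], row[j] = row[j], row[j-1]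
--             j -= 1
--     return row
-- ===== SOURCE B (Python) =====
-- EMPTY = 9
--
-- def compact(col):
--     # one linear pass: within each wall(-1)-delimited segment, keep the blocks
--     # in order, then the empties; walls stay where they are
--     res, blocks, empties = [], [], 0
--     for v in col:
--         if v == -1:
--             res += blocks
--             res += [EMPTY] * empties
--             res.append(-1)
--             blocks, empties = [], 0
--         elif v == EMPTY:
--             empties += 1
--         else:
--             blocks.append(v)
--     return res + blocks + [EMPTY] * empties
--
-- def gravitate(board):
--     # returns a fresh compacted board (A mutates its argument; return values agree)
--     n, m = len(board), len(board[0])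
--     out = [list(row) for row in board]
--     for c in range(m):
--         col = compact([out[r][c] for r in range(n - 1, -1, -1)])
--         for r, e in zip(range(n - 1, -1, -1), col):
--             out[r][c] = e
--     return out
-- ===== Notes on version B (the rewrite author's own statement) =====
-- stated objective: alternative
-- what changed: Each column's wall-delimited segments are compacted in one linear pass with a (blocks, empty-count) accumulator instead of bubbling every cell left past empties one swap at a time; B also builds a fresh board instead of mutating the argument (return values agree).
import Mathlib
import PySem

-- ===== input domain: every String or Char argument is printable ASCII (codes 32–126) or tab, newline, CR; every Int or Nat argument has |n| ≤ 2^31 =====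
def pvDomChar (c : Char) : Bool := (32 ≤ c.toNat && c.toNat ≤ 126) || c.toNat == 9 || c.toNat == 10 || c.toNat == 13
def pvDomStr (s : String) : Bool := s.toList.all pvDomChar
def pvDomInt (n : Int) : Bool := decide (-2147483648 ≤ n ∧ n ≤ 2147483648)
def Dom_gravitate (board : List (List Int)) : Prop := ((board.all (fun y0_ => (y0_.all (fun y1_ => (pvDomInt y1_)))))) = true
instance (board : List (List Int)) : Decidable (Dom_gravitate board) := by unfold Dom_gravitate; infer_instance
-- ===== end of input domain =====

-- ===== PORT A =====
-- B compacts each wall-delimited column segment in one linear pass with an accumulator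
-- instead of A's per-element swap bubbling (a different algorithm). Python A mutates `board` in place and
-- returns it; Python B returns a fresh board — the equivalence is about the return value.

-- inner while loop of moveLeft: bubble the element at index j left past EMPTY(9) cells
def pyBubble (row : List Int) (j : Nat) : List Int :=
  if h : 0 < j ∧ row.getD (j - 1) 0 = 9 then
    pyBubble ((row.set (j - 1) (row.getD j 0)).set j (row.getD (j - 1) 0)) (j - 1)
  else row
termination_by j
decreasing_by omega

def moveLeft (row : List Int) : List Int :=
  (List.range row.length).foldl (fun r i => if r.getD i 0 = -1 then r else pyBubble r i) row

-- indices are in range on every input Pre_ admits; `getD`/`set`/`headD` are exact there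
-- (Python raises IndexError exactly on the inputs Pre_gravitate excludes)
def gravitate (board : List (List Int)) : List (List Int) :=
  let n := board.length
  let m := (board.headD []).length
  (List.range m).foldl (fun b c =>
    let row := ((List.range n).reverse).foldl (fun acc r => acc ++ [(b.getD r []).getD c 0]) []
    let row := moveLeft row
    (List.zip (List.range n).reverse row).foldl
      (fun b2 pe => b2.set pe.1 ((b2.getD pe.1 []).set c pe.2)) b) board

-- ===== PORT B =====
-- loop body of B's `compact`: state = (flushed result, blocks of current segment, empty count)
def cstep (st : List Int × List Int × Nat) (v : Int) : List Int × List Int × Nat :=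
  if v = -1 then (st.1 ++ st.2.1 ++ List.replicate st.2.2 9 ++ [-1], [], 0)
  else if v = 9 then (st.1, st.2.1, st.2.2 + 1)
  else (st.1, st.2.1 ++ [v], st.2.2)

def compact (col : List Int) : List Int :=
  let st := col.foldl cstep ([], [], 0)
  st.1 ++ st.2.1 ++ List.replicate st.2.2 9

def gravitate_alt (board : List (List Int)) : List (List Int) :=
  let n := board.length
  let m := (board.headD []).length
  let out := board.map (fun row => row)
  (List.range m).foldl (fun b c =>
    let col := compact (((List.range n).reverse).map (fun r => (b.getD r []).getD c 0))
    (List.zip (List.range n).reverse col).foldl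
      (fun b2 pe => b2.set pe.1 ((b2.getD pe.1 []).set c pe.2)) b) out

-- ===== PRECONDITION & SPEC =====
-- Pre_ admits exactly the inputs on which Python A returns: A raises IndexError on the
-- empty board (board[0]) and when some row is shorter than the first row.
def Pre_gravitate (board : List (List Int)) : Prop :=
  board ≠ [] ∧ ∀ row ∈ board, (board.headD []).length ≤ row.length
instance (board : List (List Int)) : Decidable (Pre_gravitate board) := by
  unfold Pre_gravitate; infer_instance
def pvWitness_gravitate : List (List Int) := [[9, -1], [3, 9], [9, 5]]

def Spec_gravitate (board : List (List Int)) (out : List (List Int)) : Prop := out = gravitate_alt board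
instance (board : List (List Int)) (out : List (List Int)) : Decidable (Spec_gravitate board out) := by unfold Spec_gravitate; infer_instance

-- ===== CLAIM (what is proved, stated in full; the proofs are below) =====
def Claim_equal_gravitate : Prop := ∀ (board : List (List Int)), Dom_gravitate board → Pre_gravitate board → Spec_gravitate board (gravitate board)

-- ===== LEMMAS AND PROOFS =====

theorem set_append_add (q t : List Int) (k : Nat) (x : Int) :
    (q ++ t).set (q.length + k) x = q ++ t.set k x := by
  rw [List.set_append, if_neg (by omega)]
  congr 2
  omega

theorem getD_append_add (q t : List Int) (k : Nat) :
    (q ++ t).getD (q.length + k) 0 = t.getD k 0 := by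
  rw [List.getD_append_right _ _ _ _ (by omega)]
  congr 1
  omega

theorem pyBubble_spec (e : Nat) (q : List Int) (v : Int) (rest : List Int)
    (hq : ∀ x, q.getLast? = some x → x ≠ 9) :
    pyBubble (q ++ (List.replicate e 9 ++ v :: rest)) (q.length + e)
      = q ++ v :: (List.replicate e 9 ++ rest) := by
  induction e generalizing rest with
  | zero =>
    rw [pyBubble]
    rcases q.eq_nil_or_concat with h | ⟨q', x, rfl⟩
    · simp [h]
    · simp only [List.concat_eq_append] at hq ⊢
      have hx : x ≠ 9 := hq x (by simp)
      have hget : ((q' ++ [x]) ++ (List.replicate 0 9 ++ v :: rest)).getD ((q' ++ [x]).length + 0 - 1) 0 = x := by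
        rw [List.getD_append _ _ _ _ (by simp)]
        simp [List.getD_eq_getElem?_getD]
      rw [hget, dif_neg (by simp [hx])]
      simp
  | succ e ih =>
    have hT : List.replicate (e+1) 9 ++ v :: rest = List.replicate e 9 ++ (9 :: v :: rest) := by
      rw [List.replicate_succ']; simp
    have hidx : q.length + (e + 1) - 1 = (q ++ List.replicate e 9).length + 0 := by simp
    have hidx2 : q.length + (e + 1) = (q ++ List.replicate e 9).length + 1 := by simp; omega
    rw [pyBubble, hT, ← List.append_assoc, hidx, hidx2]
    rw [getD_append_add, getD_append_add, set_append_add, set_append_add]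
    simp only [List.getD_cons_zero, List.getD_cons_succ, List.set_cons_zero, List.set_cons_succ]
    rw [dif_pos (by refine ⟨?_, ?_⟩ <;> simp)]
    have hidx4 : (q ++ List.replicate e 9).length + 0 = q.length + e := by simp
    rw [hidx4, List.append_assoc, ih (9 :: rest), List.replicate_succ']
    simp

theorem loop_inv (rest : List Int) : ∀ (res blocks : List Int) (e : Nat),
    (res = [] ∨ res.getLast? = some (-1)) → (∀ b ∈ blocks, b ≠ 9) →
    (List.range' ((res ++ blocks).length + e) rest.length).foldl
       (fun r i => if r.getD i 0 = -1 then r else pyBubble r i)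
       ((res ++ blocks) ++ (List.replicate e 9 ++ rest))
     = (fun st : List Int × List Int × Nat => st.1 ++ st.2.1 ++ List.replicate st.2.2 9)
         (rest.foldl cstep (res, blocks, e)) := by
  induction rest with
  | nil => intro res blocks e _ _; simp
  | cons v rest ih =>
    intro res blocks e hres hbl
    have hq : ∀ x, (res ++ blocks).getLast? = some x → x ≠ 9 := by
      intro x hx
      by_cases hb : blocks = []
      · rw [hb, List.append_nil] at hx
        rcases hres with h | h
        · simp [h] at hx
        · rw [h] at hx
          injection hx with hx
          omega
      · rw [List.getLast?_append_of_ne_nil _ hb] at hx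
        exact hbl x (List.mem_of_getLast? hx)
    have hget : ((res ++ blocks) ++ (List.replicate e 9 ++ v :: rest)).getD ((res ++ blocks).length + e) 0 = v := by
      rw [getD_append_add]
      rw [List.getD_append_right _ _ _ _ (by simp)]
      simp
    rw [List.length_cons, List.range'_succ, List.foldl_cons, hget]
    by_cases hv : v = -1
    · rw [if_pos hv]
      subst hv
      have harr : (res ++ blocks) ++ (List.replicate e 9 ++ (-1) :: rest)
          = ((((res ++ blocks) ++ List.replicate e 9) ++ [-1]) ++ ([] ++ (List.replicate 0 9 ++ rest))) := by
        simp
      have hlen : (res ++ blocks).length + e + 1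
          = (((((res ++ blocks) ++ List.replicate e 9) ++ [-1]) ++ ([] : List Int)).length + 0) := by
        simp
        omega
      rw [harr, hlen, ← List.append_assoc (((res ++ blocks) ++ List.replicate e 9) ++ [-1])]
      rw [ih _ [] 0 (Or.inr (by simp)) (by simp)]
      simp [cstep, List.foldl_cons, List.append_assoc]
    · rw [if_neg hv, pyBubble_spec e _ v rest hq]
      by_cases h9 : v = 9
      · subst h9
        have harr : (res ++ blocks) ++ 9 :: (List.replicate e 9 ++ rest)
            = (res ++ blocks) ++ (List.replicate (e+1) 9 ++ rest) := by
          simp [List.replicate_succ]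
        have hlen : (res ++ blocks).length + e + 1 = (res ++ blocks).length + (e+1) := by omega
        rw [harr, hlen, ih res blocks (e+1) hres hbl]
        simp [cstep, hv]
      · have harr : (res ++ blocks) ++ v :: (List.replicate e 9 ++ rest)
            = (res ++ (blocks ++ [v])) ++ (List.replicate e 9 ++ rest) := by
          simp
        have hlen : (res ++ blocks).length + e + 1 = (res ++ (blocks ++ [v])).length + e := by
          simp; omega
        rw [harr, hlen, ih res (blocks ++ [v]) e hres ?_]
        · simp [cstep, hv, h9]
        · intro b hbm
          rcases List.mem_append.1 hbm with h | h
          · exact hbl b h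
          · simp at h; subst h; exact h9

theorem moveLeft_eq (col : List Int) : moveLeft col = compact col := by
  have := loop_inv col [] [] 0 (Or.inl rfl) (by simp)
  simp only [List.nil_append, List.replicate_zero, List.length_nil, Nat.zero_add] at this
  unfold moveLeft compact
  rw [List.range_eq_range']
  simpa using this

theorem foldl_push (f : Nat → Int) (l : List Nat) (acc : List Int) :
    l.foldl (fun acc r => acc ++ [f r]) acc = acc ++ l.map f := by
  induction l generalizing acc <;> simp [*]

-- ===== VERDICT (by name: the statement is the Claim_ definition above) =====
theorem gravitate_spec : Claim_equal_gravitate := by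
  intro board _ _
  unfold Spec_gravitate gravitate gravitate_alt
  simp only [foldl_push, List.nil_append, moveLeft_eq, List.map_id']
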